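-- pv_equiv track=rewrite | github.com/sraashis/easytorch | easytorch/vision/imageutils.py | get_chunk_indexes
-- ===== SOURCE A (Python) =====
-- def get_chunk_indexes(img_shape=(0, 0), chunk_shape=(0, 0), offset_row_col=None):
--     """
--     Returns a generator for four corners of each patch within image as specified.
--     :param img_shape: Shape of the original image
--     :param chunk_shape: Shape of desired patch
--     :param offset_row_col: Offset for each patch on both x, y directions
--     :return:
--     """
--     img_rows, img_cols = img_shape
--     chunk_row, chunk_col = chunk_shape
--     offset_row, offset_col = offset_row_col
--
--     row_end = False
--     for i in range(0, img_rows, offset_row):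
--         if row_end:
--             continue
--         row_from, row_to = i, i + chunk_row
--         if row_to > img_rows:
--             row_to = img_rows
--             row_from = img_rows - chunk_row
--             row_end = True
--
--         col_end = False
--         for j in range(0, img_cols, offset_col):
--             if col_end:
--                 continue
--             col_from, col_to = j, j + chunk_col
--             if col_to > img_cols:
--                 col_to = img_cols
--                 col_from = img_cols - chunk_col
--                 col_end = True
--             yield [int(row_from), int(row_to), int(col_from), int(col_to)]
-- ===== SOURCE B (Python) =====
-- def _axis_ranges(size, chunk, offset):
--     """(from, to) pairs along one axis: full strips, then one clamped final strip."""
--     pairs = []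
--     for a in range(0, size, offset):
--         if a + chunk > size:
--             pairs.append((size - chunk, size))
--             break
--         pairs.append((a, a + chunk))
--     return pairs
--
--
-- def get_chunk_indexes(img_shape=(0, 0), chunk_shape=(0, 0), offset_row_col=None):
--     rows = _axis_ranges(img_shape[0], chunk_shape[0], offset_row_col[0])
--     if not rows:
--         return []
--     cols = _axis_ranges(img_shape[1], chunk_shape[1], offset_row_col[1])
--     return [[int(rf), int(rt), int(cf), int(ct)]
--             for rf, rt in rows for cf, ct in cols]
-- ===== Notes on version B (the rewrite author's own statement) =====
-- stated objective: simpler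
-- what changed: replaces A's sentinel-flag generator (row_end/col_end booleans with 'continue' skipping the rest of each range) by a per-axis helper that precomputes the (from,to) strip list with an early break, followed by a cartesian-product comprehension (columns not computed when there is no row strip)
import Mathlib
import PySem

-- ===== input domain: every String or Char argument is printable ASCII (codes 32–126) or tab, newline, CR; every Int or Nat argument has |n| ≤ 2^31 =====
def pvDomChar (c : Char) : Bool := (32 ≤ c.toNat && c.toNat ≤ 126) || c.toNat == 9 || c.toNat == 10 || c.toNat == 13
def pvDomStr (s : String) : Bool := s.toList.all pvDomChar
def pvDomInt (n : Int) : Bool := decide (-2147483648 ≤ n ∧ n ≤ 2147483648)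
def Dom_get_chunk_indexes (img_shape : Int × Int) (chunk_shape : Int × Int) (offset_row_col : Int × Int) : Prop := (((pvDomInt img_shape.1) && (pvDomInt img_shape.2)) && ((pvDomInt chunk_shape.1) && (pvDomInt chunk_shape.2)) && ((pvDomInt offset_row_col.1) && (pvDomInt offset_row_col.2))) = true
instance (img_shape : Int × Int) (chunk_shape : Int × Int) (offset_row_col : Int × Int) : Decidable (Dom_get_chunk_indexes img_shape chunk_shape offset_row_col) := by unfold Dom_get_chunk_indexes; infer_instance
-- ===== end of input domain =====

-- B replaces A's sentinel-flag 'continue' loops by a per-axis precomputed strip list (with break)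
-- and a cartesian-product comprehension; simpler decomposition, return value proved equal on Pre_.


-- ===== PORT A =====
-- Literal port of A: outer fold over range(0, img_rows, offset_row) with a row_end flag that
-- skips remaining iterations, inner fold over range(0, img_cols, offset_col) with a col_end flag,
-- clamped strip when to > size; yields accumulated into a list (int() is the identity on ints).
def get_chunk_indexes (img_shape : Int × Int) (chunk_shape : Int × Int) (offset_row_col : Int × Int) : List (List Int) :=
  let img_rows := img_shape.1
  let img_cols := img_shape.2
  let chunk_row := chunk_shape.1
  let chunk_col := chunk_shape.2
  let offset_row := offset_row_col.1
  let offset_col := offset_row_col.2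
  ((PySem.List.pyRange 0 img_rows offset_row).foldl (fun (st : Bool × List (List Int)) i =>
      if st.1 then st
      else
        let rt0 := i + chunk_row
        let row_end := rt0 > img_rows
        let row_from := if rt0 > img_rows then img_rows - chunk_row else i
        let row_to := if rt0 > img_rows then img_rows else rt0
        let inner := (PySem.List.pyRange 0 img_cols offset_col).foldl (fun (cs : Bool × List (List Int)) j =>
            if cs.1 then cs
            else
              let ct0 := j + chunk_col
              if ct0 > img_cols then (true, cs.2 ++ [[row_from, row_to, img_cols - chunk_col, img_cols]])
              else (cs.1, cs.2 ++ [[row_from, row_to, j, ct0]])) (false, st.2)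
        (row_end, inner.2)) (false, [])).2

-- ===== PORT B =====
-- _axis_ranges: walk the same range list, full strips until one overruns, then one clamped strip, break.
def pvAxisGo (size chunk : Int) : List Int → List (Int × Int) → List (Int × Int)
  | [], acc => acc.reverse
  | a :: rest, acc =>
      if a + chunk > size then ((size - chunk, size) :: acc).reverse
      else pvAxisGo size chunk rest ((a, a + chunk) :: acc)

def pvAxisRanges (size chunk offset : Int) : List (Int × Int) :=
  pvAxisGo size chunk (PySem.List.pyRange 0 size offset) []

def get_chunk_indexes_alt (img_shape : Int × Int) (chunk_shape : Int × Int) (offset_row_col : Int × Int) : List (List Int) :=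
  let rows := pvAxisRanges img_shape.1 chunk_shape.1 offset_row_col.1
  if rows.isEmpty then []
  else
    let cols := pvAxisRanges img_shape.2 chunk_shape.2 offset_row_col.2
    rows.flatMap (fun r => cols.map (fun c => [r.1, r.2, c.1, c.2]))

-- ===== PRECONDITION & SPEC =====
-- Pre_ excludes exactly the inputs where A raises ValueError from a zero-step range:
-- offset_row = 0, or offset_col = 0 when the row range is nonempty (when the row range is
-- empty the zero-step inner range is never evaluated and A returns normally, so that stays inside).
def Pre_get_chunk_indexes (img_shape : Int × Int) (chunk_shape : Int × Int) (offset_row_col : Int × Int) : Prop :=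
  offset_row_col.1 ≠ 0 ∧
    (offset_row_col.2 ≠ 0 ∨
      (0 < offset_row_col.1 ∧ img_shape.1 ≤ 0) ∨ (offset_row_col.1 < 0 ∧ 0 ≤ img_shape.1))
instance (img_shape : Int × Int) (chunk_shape : Int × Int) (offset_row_col : Int × Int) : Decidable (Pre_get_chunk_indexes img_shape chunk_shape offset_row_col) := by unfold Pre_get_chunk_indexes; infer_instance

def pvWitness_get_chunk_indexes : (Int × Int) × (Int × Int) × (Int × Int) := ((5, 4), (2, 2), (2, 2))

def Spec_get_chunk_indexes (img_shape : Int × Int) (chunk_shape : Int × Int) (offset_row_col : Int × Int) (out : List (List Int)) : Prop := out = get_chunk_indexes_alt img_shape chunk_shape offset_row_col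
instance (img_shape : Int × Int) (chunk_shape : Int × Int) (offset_row_col : Int × Int) (out : List (List Int)) : Decidable (Spec_get_chunk_indexes img_shape chunk_shape offset_row_col out) := by unfold Spec_get_chunk_indexes; infer_instance

-- ===== CLAIM (what is proved, stated in full; the proofs are below) =====
def Claim_equal_get_chunk_indexes : Prop := ∀ (img_shape : Int × Int) (chunk_shape : Int × Int) (offset_row_col : Int × Int), Dom_get_chunk_indexes img_shape chunk_shape offset_row_col → Pre_get_chunk_indexes img_shape chunk_shape offset_row_col → Spec_get_chunk_indexes img_shape chunk_shape offset_row_col (get_chunk_indexes img_shape chunk_shape offset_row_col)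

-- ===== LEMMAS AND PROOFS =====

-- Proof-side non-accumulator form of B's axis helper.
def pvStrips (size chunk : Int) : List Int → List (Int × Int)
  | [] => []
  | a :: rest =>
      if a + chunk > size then [(size - chunk, size)]
      else (a, a + chunk) :: pvStrips size chunk rest

theorem pvStrips_eq_nil (size chunk : Int) (xs : List Int) :
    pvStrips size chunk xs = [] ↔ xs = [] := by
  cases xs with
  | nil => simp [pvStrips]
  | cons a rest =>
    simp only [pvStrips]
    by_cases h : a + chunk > size <;> simp [h]

theorem pvAxisGo_eq (size chunk : Int) :
    ∀ (xs : List Int) (acc : List (Int × Int)),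
      pvAxisGo size chunk xs acc = acc.reverse ++ pvStrips size chunk xs := by
  intro xs
  induction xs with
  | nil => intro acc; simp [pvAxisGo, pvStrips]
  | cons a rest ih =>
    intro acc
    by_cases h : a + chunk > size
    · simp [pvAxisGo, pvStrips, h]
    · simp [pvAxisGo, pvStrips, h, ih]


-- Once the flag is true, a skip-shaped fold body leaves the state unchanged.
theorem pv_foldl_true {α β : Type} (g : (Bool × β) → α → (Bool × β))
    (hg : ∀ (b : β) (x : α), g (true, b) x = (true, b)) :
    ∀ (xs : List α) (b : β), xs.foldl g (true, b) = (true, b) := by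
  intro xs
  induction xs with
  | nil => intro b; rfl
  | cons x xs ih => intro b; simp [List.foldl, hg b x, ih b]

-- The inner (column) fold accumulates exactly the strips pvStrips produces.
theorem pv_inner_snd (img_cols chunk_col row_from row_to : Int) :
    ∀ (js : List Int) (acc : List (List Int)),
      (js.foldl (fun (cs : Bool × List (List Int)) j =>
          if cs.1 then cs
          else
            let ct0 := j + chunk_col
            if ct0 > img_cols then (true, cs.2 ++ [[row_from, row_to, img_cols - chunk_col, img_cols]])
            else (cs.1, cs.2 ++ [[row_from, row_to, j, ct0]])) (false, acc)).2
      = acc ++ (pvStrips img_cols chunk_col js).map (fun c => [row_from, row_to, c.1, c.2]) := by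
  intro js
  induction js with
  | nil => intro acc; simp [pvStrips]
  | cons j js ih =>
    intro acc
    by_cases h : j + chunk_col > img_cols
    · simp only [List.foldl, if_neg (by simp : ¬ (false = true))]
      rw [if_pos h]
      rw [pv_foldl_true _ (fun b x => by simp)]
      simp [pvStrips, h]
    · simp only [List.foldl, if_neg (by simp : ¬ (false = true))]
      rw [if_neg h, ih]
      simp [pvStrips, h]

-- The outer (row) fold accumulates the cartesian product of the two strip lists.
theorem pv_outer_snd (img_rows img_cols chunk_row chunk_col offset_col : Int) :
    ∀ (is_ : List Int) (acc : List (List Int)),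
      (is_.foldl (fun (st : Bool × List (List Int)) i =>
          if st.1 then st
          else
            let rt0 := i + chunk_row
            let row_end := rt0 > img_rows
            let row_from := if rt0 > img_rows then img_rows - chunk_row else i
            let row_to := if rt0 > img_rows then img_rows else rt0
            let inner := (PySem.List.pyRange 0 img_cols offset_col).foldl (fun (cs : Bool × List (List Int)) j =>
                if cs.1 then cs
                else
                  let ct0 := j + chunk_col
                  if ct0 > img_cols then (true, cs.2 ++ [[row_from, row_to, img_cols - chunk_col, img_cols]])
                  else (cs.1, cs.2 ++ [[row_from, row_to, j, ct0]])) (false, st.2)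
            (row_end, inner.2)) (false, acc)).2
      = acc ++ (pvStrips img_rows chunk_row is_).flatMap
          (fun r => (pvStrips img_cols chunk_col (PySem.List.pyRange 0 img_cols offset_col)).map
            (fun c => [r.1, r.2, c.1, c.2])) := by
  intro is_
  induction is_ with
  | nil => intro acc; simp [pvStrips]
  | cons i is ih =>
    intro acc
    by_cases h : i + chunk_row > img_rows
    · simp only [List.foldl, if_neg (by simp : ¬ (false = true))]
      simp only [h, if_pos, decide_true]
      rw [pv_foldl_true _ (fun b x => by simp)]
      simp only [pvStrips, if_pos h]
      rw [pv_inner_snd]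
      simp
    · simp only [List.foldl, if_neg (by simp : ¬ (false = true))]
      simp only [h, decide_false]
      rw [pv_inner_snd]
      rw [ih]
      simp [pvStrips, h]

-- ===== VERDICT (by name: the statement is the Claim_ definition above) =====
theorem get_chunk_indexes_spec : Claim_equal_get_chunk_indexes := by
  intro img_shape chunk_shape offset_row_col _ _
  unfold Spec_get_chunk_indexes get_chunk_indexes get_chunk_indexes_alt pvAxisRanges
  rw [pv_outer_snd, pvAxisGo_eq, pvAxisGo_eq]
  by_cases h : pvStrips img_shape.1 chunk_shape.1 (PySem.List.pyRange 0 img_shape.1 offset_row_col.1) = []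
  · rw [(pvStrips_eq_nil _ _ _).mp h]
    simp [pvStrips]
  · simp [List.isEmpty_iff, h]
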